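-- pv_equiv track=rewrite | github.com/moon-subin/NER-finetuning | src/rules/regex_postrules.py | _bio_to_spans
-- ===== SOURCE A (Python) =====
-- from typing import Dict, List, Tuple, Optional
--
-- def _bio_to_spans(tokens: List[str], labels: List[str]) -> List[Tuple[str,int,int]]:
--     spans = []
--     cur_type, s = None, None
--     for i, lab in enumerate(labels):
--         if not lab or lab == 'O':
--             if cur_type is not None:
--                 spans.append((cur_type, s, i))
--                 cur_type, s = None, None
--             continue
--         if '-' in lab:
--             tag, etype = lab.split('-', 1)
--         else:
--             tag, etype = lab, None
--         if tag == 'B':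
--             if cur_type is not None: spans.append((cur_type, s, i))
--             cur_type, s = etype, i
--         elif tag == 'I':
--             if cur_type != etype:
--                 if cur_type is not None: spans.append((cur_type, s, i))
--                 cur_type, s = etype, i
--         else:
--             if cur_type is not None:
--                 spans.append((cur_type, s, i))
--             cur_type, s = None, None
--     if cur_type is not None:
--         spans.append((cur_type, s, len(labels)))
--     return spans
-- ===== SOURCE B (Python) =====
-- from typing import List, Tuple, Optional
--
-- def _parse(lab):
--     # None for O/empty; otherwise (tag, etype) with etype None for a bare tag
--     if not lab or lab == 'O':
--         return None
--     if '-' in lab: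
--         tag, etype = lab.split('-', 1)
--         return (tag, etype)
--     return (lab, None)
--
-- def _bio_to_spans(tokens: List[str], labels: List[str]) -> List[Tuple[str, int, int]]:
--     parsed = [_parse(lab) for lab in labels]
--     # pass 1: collect span starts (index, type); i starts a span iff its tag is
--     # 'B' with a type, or 'I' with a type differing from the previous effective type
--     starts = []
--     prev = None  # effective type of the previous position
--     for i, p in enumerate(parsed):
--         if p is not None and p[1] is not None and (p[0] == 'B' or (p[0] == 'I' and p[1] != prev)):
--             starts.append((i, p[1]))
--         prev = p[1] if p is not None and p[0] in ('B', 'I') else None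
--     # pass 2: extend each start over the following run of matching 'I' labels
--     spans = []
--     for i, t in starts:
--         j = i + 1
--         for q in parsed[i + 1:]:
--             if q is not None and q[0] == 'I' and q[1] == t:
--                 j += 1
--             else:
--                 break
--         spans.append((t, i, j))
--     return spans
-- ===== Notes on version B (the rewrite author's own statement) =====
-- stated objective: alternative
-- what changed: Replaces A's single flush-on-change state loop with a two-pass boundary decomposition: first detect span-start indices from per-token effective types, then extend each start over its run of matching I labels.
import Mathlib
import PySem

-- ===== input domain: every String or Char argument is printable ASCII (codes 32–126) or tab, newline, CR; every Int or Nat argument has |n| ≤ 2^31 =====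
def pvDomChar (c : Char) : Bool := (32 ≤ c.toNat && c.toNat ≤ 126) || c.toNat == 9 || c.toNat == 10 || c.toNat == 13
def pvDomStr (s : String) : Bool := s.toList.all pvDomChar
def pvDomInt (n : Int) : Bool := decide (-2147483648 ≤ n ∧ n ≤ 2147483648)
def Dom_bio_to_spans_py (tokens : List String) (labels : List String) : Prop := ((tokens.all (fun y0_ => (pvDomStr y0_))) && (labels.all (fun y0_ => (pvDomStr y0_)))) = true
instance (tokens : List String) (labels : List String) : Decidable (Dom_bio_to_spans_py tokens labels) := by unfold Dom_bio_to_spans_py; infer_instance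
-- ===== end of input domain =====

-- B replaces A's flush-on-change state loop with a two-pass boundary-detection decomposition (same result, same cost).

-- lab.split('-', 1): exact for a string containing '-' — part before the first '-' and everything after it
def splitDash1 (lab : String) : String × String :=
  let cs := lab.toList
  (String.mk (cs.takeWhile (· ≠ '-')), String.mk ((cs.dropWhile (· ≠ '-')).drop 1))

-- ===== PORT A =====
-- the for-loop of A, one element per step; `s` is kept as a Nat (Python sets s to None only
-- together with cur_type = None, and s is never read in that state; we leave it unchanged there)
def aLoop (labels : List String) (i : Nat) (cur : Option String) (s : Nat)
    (spans : List (String × Int × Int)) : List (String × Int × Int) :=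
  match labels with
  | [] =>
    match cur with
    | some t => spans ++ [(t, (s : Int), (i : Int))]
    | none => spans
  | lab :: rest =>
    if lab = "" ∨ lab = "O" then
      match cur with
      | some t => aLoop rest (i+1) none s (spans ++ [(t, (s : Int), (i : Int))])
      | none => aLoop rest (i+1) none s spans
    else
      let te : String × Option String :=
        if lab.toList.contains '-' then ((splitDash1 lab).1, some (splitDash1 lab).2)
        else (lab, none)
      if te.1 = "B" then
        match cur with
        | some t => aLoop rest (i+1) te.2 i (spans ++ [(t, (s : Int), (i : Int))])
        | none => aLoop rest (i+1) te.2 i spans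
      else if te.1 = "I" then
        if cur ≠ te.2 then
          match cur with
          | some t => aLoop rest (i+1) te.2 i (spans ++ [(t, (s : Int), (i : Int))])
          | none => aLoop rest (i+1) te.2 i spans
        else aLoop rest (i+1) cur s spans
      else
        match cur with
        | some t => aLoop rest (i+1) none s (spans ++ [(t, (s : Int), (i : Int))])
        | none => aLoop rest (i+1) none s spans

def bio_to_spans_py (tokens : List String) (labels : List String) : List (String × Int × Int) :=
  aLoop labels 0 none 0 []

-- ===== PORT B =====
-- _parse: None for O/empty, else (tag, etype) with etype = None for a bare tag
def parseLab (lab : String) : Option (String × Option String) :=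
  if lab = "" ∨ lab = "O" then none
  else if lab.toList.contains '-' then some ((splitDash1 lab).1, some (splitDash1 lab).2)
  else some (lab, none)

-- prev = p[1] if p is not None and p[0] in ('B','I') else None
def effOf (p : Option (String × Option String)) : Option String :=
  match p with
  | some (tag, et) => if tag = "B" ∨ tag = "I" then et else none
  | none => none

-- pass 1 of B: span-start indices with their types
def startsGo (parsed : List (Option (String × Option String))) (i : Nat) (prev : Option String) :
    List (Nat × String) :=
  match parsed with
  | [] => []
  | p :: rest =>
    match p with
    | some (tag, some t) =>
      if tag = "B" ∨ (tag = "I" ∧ some t ≠ prev) then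
        (i, t) :: startsGo rest (i+1) (effOf p)
      else startsGo rest (i+1) (effOf p)
    | _ => startsGo rest (i+1) (effOf p)

-- the break-on-mismatch inner loop of pass 2: q is not None and q[0]=='I' and q[1]==t
def isIt (t : String) (p : Option (String × Option String)) : Bool :=
  match p with
  | some (tag, et) => tag == "I" && et == some t
  | none => false

def runCount (t : String) (ps : List (Option (String × Option String))) : Nat :=
  match ps with
  | [] => 0
  | p :: rest => if isIt t p then runCount t rest + 1 else 0

def bio_to_spans_py_alt (tokens : List String) (labels : List String) : List (String × Int × Int) :=
  let parsed := labels.map parseLab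
  (startsGo parsed 0 none).map
    (fun it => (it.2, (it.1 : Int), ((it.1 + 1 + runCount it.2 (parsed.drop (it.1 + 1)) : Nat) : Int)))

-- ===== PRECONDITION & SPEC =====
def Spec_bio_to_spans_py (tokens : List String) (labels : List String) (out : List (String × Int × Int)) : Prop := out = bio_to_spans_py_alt tokens labels
instance (tokens : List String) (labels : List String) (out : List (String × Int × Int)) : Decidable (Spec_bio_to_spans_py tokens labels out) := by unfold Spec_bio_to_spans_py; infer_instance

-- ===== CLAIM (what is proved, stated in full; the proofs are below) =====
def Claim_equal_bio_to_spans_py : Prop := ∀ (tokens : List String) (labels : List String), Dom_bio_to_spans_py tokens labels → Spec_bio_to_spans_py tokens labels (bio_to_spans_py tokens labels)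

-- ===== LEMMAS AND PROOFS =====

-- middle form shared by both proofs: A's loop over the parsed list, open span carried as (type, start)
def newOpen (p : Option (String × Option String)) (i : Nat) : Option (String × Nat) :=
  match p with
  | some (tag, some t) => if tag = "B" ∨ tag = "I" then some (t, i) else none
  | _ => none

def chain (ps : List (Option (String × Option String))) (i : Nat) (op : Option (String × Nat)) :
    List (String × Int × Int) :=
  match ps with
  | [] =>
    match op with
    | some (t, s) => [(t, (s : Int), (i : Int))]
    | none => []
  | p :: rest =>
    match op with
    | some (t, s) =>
      if isIt t p then chain rest (i+1) (some (t, s))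
      else (t, (s : Int), (i : Int)) :: chain rest (i+1) (newOpen p i)
    | none => chain rest (i+1) (newOpen p i)

theorem aLoop_eq_chain (labels : List String) :
    ∀ (i : Nat) (cur : Option String) (s : Nat) (spans : List (String × Int × Int)),
    aLoop labels i cur s spans
      = spans ++ chain (labels.map parseLab) i (cur.map (fun t => (t, s))) := by
  induction labels with
  | nil =>
    intro i cur s spans
    cases cur <;> simp [aLoop, chain]
  | cons lab rest ih =>
    intro i cur s spans
    by_cases h0 : lab = "" ∨ lab = "O"
    · cases cur <;>
        simp [aLoop, chain, parseLab, h0, isIt, newOpen, ih]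
    · by_cases hd : '-' ∈ lab.toList
      · rcases hsp : splitDash1 lab with ⟨tg, ety⟩
        by_cases hB : tg = "B"
        · cases cur <;>
            simp [aLoop, chain, parseLab, h0, hd, hsp, hB, isIt, newOpen, ih]
        · by_cases hI : tg = "I"
          · rcases cur with _ | t
            · simp [aLoop, chain, parseLab, h0, hd, hsp, hB, hI, isIt, newOpen, ih]
            · by_cases heq : t = ety
              · subst heq
                simp [aLoop, chain, parseLab, h0, hd, hsp, hB, hI, isIt, newOpen, ih]
              · have hne : (some t : Option String) ≠ some ety := by simp [heq]
                have heq' : ¬ ety = t := fun h => heq h.symm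
                simp [aLoop, chain, parseLab, h0, hd, hsp, hB, hI, heq, heq', hne, isIt, newOpen, ih]
          · cases cur <;>
              simp [aLoop, chain, parseLab, h0, hd, hsp, hB, hI, isIt, newOpen, ih]
      · -- no '-': te = (lab, none), tag = lab
        by_cases hB : lab = "B"
        · cases cur <;>
            simp [aLoop, chain, parseLab, h0, hd, hB, isIt, newOpen, ih]
        · by_cases hI : lab = "I"
          · rcases cur with _ | t
            · simp [aLoop, chain, parseLab, h0, hd, hB, hI, isIt, newOpen, ih]
            · have hne : (some t : Option String) ≠ none := by simp
              have : isIt t (some (lab, none)) = false := by simp [isIt]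
              simp [aLoop, chain, parseLab, h0, hd, hB, hI, hne, this, isIt, newOpen, ih]
          · cases cur <;>
              simp [aLoop, chain, parseLab, h0, hd, hB, hI, isIt, newOpen, ih]

-- span completion used by B's pass 2, phrased against the full parsed list
def spanOf (parsed : List (Option (String × Option String))) (it : Nat × String) :
    String × Int × Int :=
  (it.2, (it.1 : Int), ((it.1 + 1 + runCount it.2 (parsed.drop (it.1 + 1)) : Nat) : Int))

theorem chain_eq_starts (parsed : List (Option (String × Option String))) :
    ∀ (q : List (Option (String × Option String))) (i : Nat), parsed.drop i = q →
    (chain q i none = (startsGo q i none).map (spanOf parsed))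
    ∧ (∀ (t : String) (s : Nat),
        chain q i (some (t, s))
          = (t, (s : Int), ((i + runCount t q : Nat) : Int))
              :: (startsGo q i (some t)).map (spanOf parsed)) := by
  intro q
  induction q with
  | nil =>
    intro i _
    refine ⟨by simp [chain, startsGo], ?_⟩
    intro t s
    simp [chain, startsGo, runCount]
  | cons p rest ih =>
    intro i hdrop
    have hrest : parsed.drop (i+1) = rest := by
      rw [← List.tail_drop, hdrop]
      rfl
    have IH := ih (i+1) hrest
    constructor
    · -- none state
      rcases p with _ | ⟨tag, et⟩
      · simp [chain, startsGo, newOpen, effOf, IH.1]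
      · rcases et with _ | u
        · simp [chain, startsGo, newOpen, effOf, IH.1]
        · by_cases hBI : tag = "B" ∨ tag = "I"
          · have hcond : tag = "B" ∨ (tag = "I" ∧ (some u : Option String) ≠ none) := by
              rcases hBI with h | h
              · exact Or.inl h
              · exact Or.inr ⟨h, by simp⟩
            have hop : newOpen (some (tag, some u)) i = some (u, i) := by simp [newOpen, hBI]
            have heff : effOf (some (tag, some u)) = some u := by simp [effOf, hBI]
            simp only [chain, startsGo, if_pos hcond, hop, heff, List.map_cons]
            rw [IH.2 u i]
            simp [spanOf, hrest]
          · have hnB : ¬ tag = "B" := fun h => hBI (Or.inl h)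
            have hnI : ¬ tag = "I" := fun h => hBI (Or.inr h)
            simp [chain, startsGo, newOpen, effOf, hnB, hnI, IH.1]
    · -- open state
      intro t s
      by_cases hit : isIt t p = true
      · rcases p with _ | ⟨tag, et⟩
        · simp [isIt] at hit
        · have htag : tag = "I" := by
            simp [isIt] at hit; exact hit.1
          have het : et = some t := by
            simp [isIt] at hit; exact hit.2
          subst htag het
          have hnc : ¬ ("I" = "B" ∨ ("I" = "I" ∧ (some t : Option String) ≠ some t)) := by simp
          simp only [chain, hit, if_pos rfl]
          rw [IH.2 t s]
          have harith : i + (runCount t rest + 1) = i + 1 + runCount t rest := by omega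
          simp [startsGo, hnc, effOf, runCount, isIt, harith]
      · have hit' : isIt t p = false := by simpa using hit
        have hrun : runCount t (p :: rest) = 0 := by simp [runCount, hit']
        -- after closing, the head is treated exactly as in the none state
        rcases p with _ | ⟨tag, et⟩
        · simp [chain, hit', startsGo, newOpen, effOf, IH.1, hrun]
        · rcases et with _ | u
          · simp [chain, hit', startsGo, newOpen, effOf, IH.1, hrun]
          · by_cases hBI : tag = "B" ∨ tag = "I"
            · have hut : ¬ (tag = "I" ∧ u = t) := by
                intro ⟨h1, h2⟩
                simp [isIt, h1, h2] at hit'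
              have hcond : tag = "B" ∨ (tag = "I" ∧ (some u : Option String) ≠ some t) := by
                rcases hBI with h | h
                · exact Or.inl h
                · exact Or.inr ⟨h, by simp; intro h2; exact hut ⟨h, h2⟩⟩
              have hop : newOpen (some (tag, some u)) i = some (u, i) := by simp [newOpen, hBI]
              have heff : effOf (some (tag, some u)) = some u := by simp [effOf, hBI]
              simp only [chain, hit', Bool.false_eq_true, if_false, hop, heff,
                startsGo, if_pos hcond, List.map_cons, hrun]
              rw [IH.2 u i]
              simp [spanOf, hrest]
            · have hnB : ¬ tag = "B" := fun h => hBI (Or.inl h)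
              have hnI : ¬ tag = "I" := fun h => hBI (Or.inr h)
              simp [chain, hit', startsGo, newOpen, effOf, hnB, hnI, IH.1, hrun]

-- ===== VERDICT (by name: the statement is the Claim_ definition above) =====
theorem bio_to_spans_py_spec : Claim_equal_bio_to_spans_py := by
  intro tokens labels _
  unfold Spec_bio_to_spans_py bio_to_spans_py bio_to_spans_py_alt
  rw [aLoop_eq_chain]
  have h := (chain_eq_starts (labels.map parseLab) (labels.map parseLab) 0 (by simp)).1
  simpa [spanOf] using h
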